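-- pv_equiv track=rewrite | github.com/ak2yny/raven-formats | src/raven_formats/xmlb.py | from_xml_json
-- ===== SOURCE A (Python) =====
-- def convert_escape(old_line):
--     new_line = old_line.replace('\\', '\\\\')
--     new_line = new_line.replace('"', '\\"')
--     new_line = '"' + new_line
--     return new_line
--
-- def from_xml_json(string_input) -> str:
--     lines_output = []
--     indent = 8
--     for line in string_input.split('\n'):
--         # format B does not have blank lines, so they can be skipped
--         if line and not line.isspace():
--
--             # leading (indent) and trailing spaces can be removed
--             working_line = line.strip()
--
--             # begin performing conversion
--             if (working_line[0:4] == 'XMLB') and (working_line[-1] == '{'):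
--                 # this is for the header
--                 lines_output.append('{')
--                 lines_output.append((' ' * 4) + '"' + working_line[4:-1].strip() + '": {')
--             elif working_line == '}':
--                 # this deals with lines that are closing brackets. Their indent is less than the previous line
--                 indent -= 4
--                 # previous line does not need to end in a comma
--                 lines_output[-1] = lines_output[-1].strip(',')
--                 lines_output.append((' ' * indent) + '},')
--             elif working_line[-1] == '{':
--                 # this deals with lines with open brackets. They increase the indent
--                 working_line = convert_escape(working_line)
--                 lines_output.append((' ' * indent) + working_line[:-1].strip() + '": {')
--                 indent += 4
--             else:
--                 working_line = convert_escape(working_line)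
--                 working_line = working_line.replace(' = ', '": "', 1)
--                 if working_line[-1] == ';': working_line = working_line[:-1].strip()
--                 lines_output.append((' ' * indent) + working_line + '",')
--
--     # if a full file is being converted, need to add an extra bracket because header is now 2 lines (+ remove previous comma)
--     if lines_output[0] == '{':
--         lines_output[-1] = lines_output[-1].strip(',')
--         lines_output.append('}')
--
--     jstring = '\n'.join(lines_output)
--
--     return jstring
-- ===== SOURCE B (Python) =====
-- def _esc(s):
--     # escape backslash/quote in a single character pass, with the opening quote
--     return '"' + ''.join(('\\' + c) if (c == '\\' or c == '"') else c for c in s)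
--
-- def _render(items, strip_last):
--     # decide every trailing comma at render time: an item keeps its comma unless
--     # the next item is a closer (or it is last and strip_last)
--     out = [text + (',' if comma and not nxt[2] else '')
--            for (text, comma, _), nxt in zip(items, items[1:])]
--     if items:
--         text, comma, _ = items[-1]
--         out.append(text + (',' if comma and not strip_last else ''))
--     return out
--
-- def from_xml_json(string_input) -> str:
--     items = []          # (text, wants_comma, is_closer)
--     depth = 0
--     for raw in string_input.split('\n'):
--         w = raw.strip()
--         if not w:
--             continue
--         if w.startswith('XMLB') and w.endswith('{'):
--             items.append(('{', False, False))
--             items.append(('    "' + w[4:-1].strip() + '": {', False, False))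
--         elif w == '}':
--             depth -= 1
--             items.append((' ' * (8 + 4 * depth) + '}', True, True))
--         elif w.endswith('{'):
--             t = _esc(w)
--             items.append((' ' * (8 + 4 * depth) + t[:-1].strip() + '": {', False, False))
--             depth += 1
--         else:
--             t = _esc(w)
--             i = t.find(' = ')
--             if i != -1:
--                 t = t[:i] + '": "' + t[i + 3:]
--             if t.endswith(';'):
--                 t = t[:-1].strip()
--             items.append((' ' * (8 + 4 * depth) + t + '"', True, False))
--     header = bool(items) and items[0][0] == '{'
--     lines = _render(items, header) + (['}'] if header else [])
--     return '\n'.join(lines)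
-- ===== Notes on version B (the rewrite author's own statement) =====
-- stated objective: alternative
-- what changed: B parses the lines into a list of tagged items (text, wants-comma, is-closer) with a depth counter and decides every trailing comma at render time from the following item (and a header flag), instead of A's running indent with appends and retroactive strip(',') edits of the last output line; escaping is one character pass instead of two sequential str.replace passes, and the single ' = ' replacement is done by find+splice instead of replace(...,1).
import Mathlib
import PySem

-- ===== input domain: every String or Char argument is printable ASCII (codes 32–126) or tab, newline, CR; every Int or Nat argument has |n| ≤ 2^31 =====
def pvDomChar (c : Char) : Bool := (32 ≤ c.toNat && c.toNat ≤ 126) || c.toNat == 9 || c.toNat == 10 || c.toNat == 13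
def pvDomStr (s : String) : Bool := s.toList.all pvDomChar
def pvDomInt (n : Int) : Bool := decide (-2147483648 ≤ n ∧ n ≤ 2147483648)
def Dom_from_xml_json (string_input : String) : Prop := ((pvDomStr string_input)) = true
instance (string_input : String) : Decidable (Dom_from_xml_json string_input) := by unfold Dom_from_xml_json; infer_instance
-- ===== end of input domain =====

-- B rebuilds the conversion as: one-pass char escaping, a list of (text, wants-comma, is-closer)
-- items with a depth counter, and render-time comma decisions (instead of A's retroactive strip(',')).

-- ===== PORT A =====

-- ' ' * n  (Python: empty for n ≤ 0)
def pvSpaces (n : Int) : List Char := List.replicate n.toNat ' '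

-- convert_escape: two sequential str.replace passes, then the opening quote
def pvConvEsc (oldLine : List Char) : List Char :=
  let n1 := PySem.Chars.replace oldLine ['\\'] ['\\', '\\']
  let n2 := PySem.Chars.replace n1 ['"'] ['\\', '"']
  '"' :: n2

-- hand port of str.replace(old, new, 1) (PySem.Chars.replace has no count); exact for nonempty old
def pvReplace1 (old new : List Char) : List Char → List Char
  | [] => []
  | c :: t => if old.isPrefixOf (c :: t) then new ++ (c :: t).drop old.length else c :: pvReplace1 old new t

-- lines_output[-1] = lines_output[-1].strip(',')  (on [] Python raises IndexError; excluded by Pre_)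
def pvStripLast (out : List (List Char)) : List (List Char) :=
  match out.getLast? with
  | some l => out.dropLast ++ [PySem.Chars.stripChars l [',']]
  | none => out

-- loop body of A, after the blank-line guard, on the stripped line w
def pvCoreA (st : List (List Char) × Int) (w : List Char) : List (List Char) × Int :=
  if PySem.Chars.slice w (some 0) (some 4) == ['X', 'M', 'L', 'B'] && PySem.List.pyGet? w (-1) == some '{' then
    (st.1 ++ [['{'], ((pvSpaces 4 ++ ['"']) ++ PySem.Chars.strip (PySem.Chars.slice w (some 4) (some (-1)))) ++ ['"', ':', ' ', '{']], st.2)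
  else if w == ['}'] then
    (pvStripLast st.1 ++ [pvSpaces (st.2 - 4) ++ ['}', ',']], st.2 - 4)
  else if PySem.List.pyGet? w (-1) == some '{' then
    let wl := pvConvEsc w
    (st.1 ++ [(pvSpaces st.2 ++ PySem.Chars.strip (PySem.Chars.slice wl none (some (-1)))) ++ ['"', ':', ' ', '{']], st.2 + 4)
  else
    let wl := pvReplace1 [' ', '=', ' '] ['"', ':', ' ', '"'] (pvConvEsc w)
    let wl := if PySem.List.pyGet? wl (-1) == some ';' then PySem.Chars.strip (PySem.Chars.slice wl none (some (-1))) else wl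
    (st.1 ++ [(pvSpaces st.2 ++ wl) ++ ['"', ',']], st.2)

def pvStepA (st : List (List Char) × Int) (line : List Char) : List (List Char) × Int :=
  if !line.isEmpty && !PySem.Chars.strIsspace line then pvCoreA st (PySem.Chars.strip line) else st

def from_xml_json (string_input : String) : String :=
  let st := (PySem.Chars.splitOn string_input.toList ['\n']).foldl pvStepA ([], 8)
  let out := if PySem.List.pyGet? st.1 0 == some ['{'] then pvStripLast st.1 ++ [['}']] else st.1
  String.mk (PySem.Chars.join ['\n'] out)

-- ===== PORT B =====

-- items are (text, wants_comma, is_closer)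
def pvEscChar (c : Char) : List Char := if c == '\\' || c == '"' then ['\\', c] else [c]

-- _esc: single character pass with the opening quote
def pvEsc (s : List Char) : List Char := '"' :: s.flatMap pvEscChar

-- loop body of B on the stripped nonempty line w
def pvCoreB (st : List (List Char × Bool × Bool) × Int) (w : List Char) : List (List Char × Bool × Bool) × Int :=
  if PySem.Chars.startswith w ['X', 'M', 'L', 'B'] && PySem.Chars.endswith w ['{'] then
    (st.1 ++ [(['{'], false, false),
              (([' ', ' ', ' ', ' ', '"'] ++ PySem.Chars.strip (PySem.Chars.slice w (some 4) (some (-1)))) ++ ['"', ':', ' ', '{'], false, false)], st.2)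
  else if w == ['}'] then
    (st.1 ++ [(pvSpaces (8 + 4 * (st.2 - 1)) ++ ['}'], true, true)], st.2 - 1)
  else if PySem.Chars.endswith w ['{'] then
    let t := pvEsc w
    (st.1 ++ [((pvSpaces (8 + 4 * st.2) ++ PySem.Chars.strip (PySem.Chars.slice t none (some (-1)))) ++ ['"', ':', ' ', '{'], false, false)], st.2 + 1)
  else
    let t := pvEsc w
    let i := PySem.Chars.find t [' ', '=', ' ']
    let t := if i != -1 then PySem.Chars.slice t none (some i) ++ ['"', ':', ' ', '"'] ++ PySem.Chars.slice t (some (i + 3)) none else t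
    let t := if PySem.Chars.endswith t [';'] then PySem.Chars.strip (PySem.Chars.slice t none (some (-1))) else t
    (st.1 ++ [((pvSpaces (8 + 4 * st.2) ++ t) ++ ['"'], true, false)], st.2)

def pvStepB (st : List (List Char × Bool × Bool) × Int) (raw : List Char) : List (List Char × Bool × Bool) × Int :=
  let w := PySem.Chars.strip raw
  if w.isEmpty then st else pvCoreB st w

-- _render: pairwise comma decision over zip(items, items[1:]), last item separately
def pvRenderZip (items : List (List Char × Bool × Bool)) (stripLast : Bool) : List (List Char) :=
  ((items.zip items.tail).map fun p => p.1.1 ++ (if p.1.2.1 && !p.2.2.2 then [','] else []))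
  ++ (match items.getLast? with
      | some it => [it.1 ++ (if it.2.1 && !stripLast then [','] else [])]
      | none => [])

def from_xml_json_alt (string_input : String) : String :=
  let items := ((PySem.Chars.splitOn string_input.toList ['\n']).foldl pvStepB ([], 0)).1
  let header := match items.head? with
    | some it => it.1 == ['{']
    | none => false
  String.mk (PySem.Chars.join ['\n'] (pvRenderZip items header ++ (if header then [['}']] else [])))

-- ===== PRECONDITION & SPEC =====

-- the stripped non-blank lines of the input
def pvKept (s : String) : List (List Char) :=
  ((PySem.Chars.splitOn s.toList ['\n']).map PySem.Chars.strip).filter (fun w => !w.isEmpty)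

-- A raises IndexError when there is no non-blank line (lines_output[0]) or the first
-- non-blank line is '}' (lines_output[-1] on the empty list); exactly those inputs are excluded.
def Pre_from_xml_json (string_input : String) : Prop :=
  pvKept string_input ≠ [] ∧ (pvKept string_input).head? ≠ some ['}']
instance (string_input : String) : Decidable (Pre_from_xml_json string_input) := by unfold Pre_from_xml_json; infer_instance

def pvWitness_from_xml_json : String := "XMLB data {\n    a = 1;\n}"

def Spec_from_xml_json (string_input : String) (out : String) : Prop := out = from_xml_json_alt string_input
instance (string_input : String) (out : String) : Decidable (Spec_from_xml_json string_input out) := by unfold Spec_from_xml_json; infer_instance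

-- ===== CLAIM (what is proved, stated in full; the proofs are below) =====
def Claim_equal_from_xml_json : Prop := ∀ (string_input : String), Dom_from_xml_json string_input → Pre_from_xml_json string_input → Spec_from_xml_json string_input (from_xml_json string_input)

-- ===== LEMMAS AND PROOFS =====

-- the rendered line of an item whose successor-is-closer flag is h (h also encodes "strip the last")
def pvLine (h : Bool) (it : List Char × Bool × Bool) : List Char :=
  it.1 ++ (if it.2.1 && !h then [','] else [])

-- reference renderer: each item's comma is decided by the NEXT item; the flag decides the last one
def pvRender : Bool → List (List Char × Bool × Bool) → List (List Char)
  | _, [] => []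
  | h, [it] => [pvLine h it]
  | h, it :: it' :: rest => pvLine it'.2.2 it :: pvRender h (it' :: rest)

-- well-formedness of every produced item (body nonempty, no comma at either end,
-- and a comma-carrying item is never the bare '{')
def pvOK (it : List Char × Bool × Bool) : Prop :=
  it.1 ≠ [] ∧ it.1.head? ≠ some ',' ∧ it.1.getLast? ≠ some ',' ∧ (it.2.1 = true → it.1.getLast? ≠ some '{')

-- the coupling invariant between A's loop state and B's
def pvInv (st : List (List Char) × Int) (tst : List (List Char × Bool × Bool) × Int) : Prop :=
  st.1 = pvRender false tst.1 ∧ st.2 = 8 + 4 * tst.2 ∧ ∀ it ∈ tst.1, pvOK it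

-- first match position, proof-side reference for find/replace1
def pvFFind (pat : List Char) : List Char → Option Nat
  | [] => if pat.isPrefixOf [] then some 0 else none
  | c :: t => if pat.isPrefixOf (c :: t) then some 0 else (pvFFind pat t).map (· + 1)

lemma pvRender_append (h : Bool) (items : List (List Char × Bool × Bool)) (z : List Char × Bool × Bool) :
    pvRender h (items ++ [z]) = pvRender z.2.2 items ++ [pvLine h z] := by
  induction items with
  | nil => simp [pvRender]
  | cons x t ih => cases t with
    | nil => simp [pvRender]
    | cons y r => simpa [pvRender] using ih

lemma pvStripChars_comma (b : List Char) (hb : b ≠ []) (hh : b.head? ≠ some ',') (hl : b.getLast? ≠ some ',') :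
    PySem.Chars.stripChars (b ++ [',']) [','] = b ∧ PySem.Chars.stripChars b [','] = b := by
  obtain ⟨c, t, rfl⟩ := List.exists_cons_of_ne_nil hb
  have hc : c ≠ ',' := by simpa using hh
  have hdrop : ∀ (x : List Char), x.getLast? ≠ some ',' →
      List.dropWhile (fun d => [','].contains d) x.reverse = x.reverse := by
    intro x hx
    cases hxr : x.reverse with
    | nil => simp
    | cons y ys =>
        have hy : x.getLast? = some y := by
          rw [← List.head?_reverse, hxr]; rfl
        have hyne : y ≠ ',' := by rw [hy] at hx; simpa using hx
        simp [List.dropWhile_cons, hyne]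
  constructor
  · rw [PySem.Chars.stripChars]
    have h1 : List.dropWhile (fun d => [','].contains d) ((c :: t) ++ [',']) = (c :: t) ++ [','] := by
      simp [List.dropWhile_cons, hc]
    rw [h1]
    have h2 : ((c :: t) ++ [',']).reverse = ',' :: (c :: t).reverse := by simp
    rw [h2]
    have h3 : List.dropWhile (fun d => [','].contains d) (',' :: (c :: t).reverse)
        = List.dropWhile (fun d => [','].contains d) (c :: t).reverse := by
      rw [List.dropWhile_cons]
      norm_num
    rw [h3, hdrop _ hl]
    simp
  · rw [PySem.Chars.stripChars]
    have h1 : List.dropWhile (fun d => [','].contains d) (c :: t) = c :: t := by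
      simp [List.dropWhile_cons, hc]
    rw [h1, hdrop _ hl]
    simp

lemma pvStripLast_render (items : List (List Char × Bool × Bool)) (hOK : ∀ it ∈ items, pvOK it) :
    pvStripLast (pvRender false items) = pvRender true items := by
  rcases List.eq_nil_or_concat items with rfl | ⟨init, l, rfl⟩
  · rfl
  · rw [List.concat_eq_append] at hOK ⊢
    obtain ⟨hne, hh, hl, _⟩ := hOK l (by simp)
    rw [pvRender_append, pvRender_append, pvStripLast]
    rw [List.getLast?_concat, List.dropLast_concat]
    congr 1
    rw [pvLine, pvLine]
    cases hc : l.2.1 with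
    | false => simpa using (pvStripChars_comma l.1 hne hh hl).2
    | true => simpa using (pvStripChars_comma l.1 hne hh hl).1

lemma pvRstrip_eq_nil_iff (l : List Char) :
    PySem.Chars.rstrip l = [] ↔ ∀ c ∈ l, PySem.Chars.isspace c := by
  simp [PySem.Chars.rstrip, List.dropWhile_eq_nil_iff]

lemma pvStrip_eq_nil_iff (l : List Char) :
    PySem.Chars.strip l = [] ↔ ∀ c ∈ l, PySem.Chars.isspace c := by
  rw [PySem.Chars.strip, pvRstrip_eq_nil_iff, PySem.Chars.lstrip]
  constructor
  · intro h c hc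
    rw [← List.takeWhile_append_dropWhile (p := PySem.Chars.isspace) (l := l)] at hc
    rcases List.mem_append.mp hc with hc | hc
    · exact List.mem_takeWhile_imp hc
    · exact h c hc
  · intro h c hc
    exact h c ((List.dropWhile_sublist _).mem hc)

-- keep test: (line and not line.isspace()) equals (line.strip() != '')
lemma pvKeep_iff (l : List Char) :
    (!l.isEmpty && !PySem.Chars.strIsspace l) = !(PySem.Chars.strip l).isEmpty := by
  rw [PySem.Chars.strIsspace]
  cases hl : l.isEmpty with
  | true => simp [List.isEmpty_iff.mp hl, PySem.Chars.strip, PySem.Chars.lstrip, PySem.Chars.rstrip]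
  | false =>
      cases hall : l.all PySem.Chars.isspace with
      | true =>
          have h0 : PySem.Chars.strip l = [] := (pvStrip_eq_nil_iff l).mpr (List.all_eq_true.mp hall)
          simp [hl, hall, h0]
      | false =>
          have h0 : PySem.Chars.strip l ≠ [] := by
            rw [Ne, pvStrip_eq_nil_iff]
            intro hx
            rw [List.all_eq_true.mpr hx] at hall
            cases hall
          simp [hl, hall, List.isEmpty_eq_false_iff.mpr h0]

lemma pvReplace_go_single (a : Char) (r : List Char) :
    ∀ (fuel : Nat) (l acc : List Char), l.length ≤ fuel →
      PySem.Chars.replace.go [a] r fuel l acc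
        = acc.reverse ++ l.flatMap (fun c => if c == a then r else [c]) := by
  intro fuel
  induction fuel with
  | zero =>
      intro l acc h
      have h0 : l = [] := List.eq_nil_of_length_eq_zero (Nat.le_zero.mp h)
      subst h0
      simp [PySem.Chars.replace.go]
  | succ n ih =>
      intro l acc h
      cases l with
      | nil => simp [PySem.Chars.replace.go]
      | cons c t =>
          rw [PySem.Chars.replace.go]
          by_cases hca : a = c
          · subst hca
            have hpre : List.isPrefixOf [a] (a :: t) = true := by simp [List.isPrefixOf]
            rw [if_pos hpre, ih _ _ (by simpa using Nat.le_of_succ_le_succ h)]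
            simp [List.flatMap_cons]
          · have hpre : List.isPrefixOf [a] (c :: t) = false := by
              simp only [List.isPrefixOf, List.isPrefixOf_nil_left, Bool.and_true,
                beq_eq_false_iff_ne, Ne]
              exact hca
            rw [if_neg (by simp [hpre]), ih _ _ (by simpa using Nat.le_of_succ_le_succ h)]
            simp only [List.flatMap_cons, List.reverse_cons, List.append_assoc,
              List.singleton_append]
            rw [if_neg (by simp only [beq_iff_eq]; exact fun he : c = a => hca he.symm)]
            simp

-- str.replace with a single-char pattern is a character map
lemma pvReplace_single (l : List Char) (a : Char) (r : List Char) :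
    PySem.Chars.replace l [a] r = l.flatMap (fun c => if c == a then r else [c]) := by
  rw [PySem.Chars.replace]
  simp only [List.isEmpty_cons, if_neg]
  exact pvReplace_go_single a r l.length l [] (le_refl _)

-- convert_escape equals the one-pass escape
lemma pvConvEsc_eq (w : List Char) : pvConvEsc w = pvEsc w := by
  rw [pvConvEsc, pvEsc]
  simp only [pvReplace_single]
  congr 1
  induction w with
  | nil => rfl
  | cons c t ih =>
      simp only [List.flatMap_cons, List.flatMap_append, ih]
      congr 1
      by_cases h1 : c = '\\'
      · subst h1; rfl
      · rw [if_neg (by simpa using h1)]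
        by_cases h2 : c = '"'
        · subst h2; rfl
        · simp only [List.flatMap_cons, List.flatMap_nil, List.append_nil]
          rw [if_neg (by simpa using h2), pvEscChar, if_neg (by simp [h1, h2])]

lemma pvFind_go_eq (pat : List Char) (hpat : pat ≠ []) :
    ∀ (l : List Char) (k : Nat), PySem.Chars.find.go pat l k
      = (match pvFFind pat l with
         | some j => ((k + j : Nat) : Int)
         | none => -1) := by
  intro l
  induction l with
  | nil =>
      intro k
      rw [PySem.Chars.find.go]
      have he : pat.isEmpty = false := by simpa [List.isEmpty_iff] using hpat
      have hp : pat.isPrefixOf ([] : List Char) = false := by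
        cases pat with
        | nil => simp at he
        | cons a b => rfl
      simp [pvFFind, hp, he]
  | cons c t ih =>
      intro k
      rw [PySem.Chars.find.go]
      cases hp : pat.isPrefixOf (c :: t) with
      | true => simp [pvFFind, hp]
      | false =>
          rw [ih (k + 1)]
          simp only [pvFFind, hp, if_false, Bool.false_eq_true]
          cases pvFFind pat t with
          | none => rfl
          | some j => simp; push_cast; ring

-- find = pvFFind
lemma pvFind_eq (pat l : List Char) (hp : pat ≠ []) :
    PySem.Chars.find l pat = match pvFFind pat l with
      | some j => (j : Int)
      | none => -1 := by
  rw [PySem.Chars.find, pvFind_go_eq pat hp]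
  cases pvFFind pat l <;> simp

-- replace1 = splice at pvFFind
lemma pvReplace1_eq (pat rep : List Char) (hpat : pat ≠ []) :
    ∀ l, pvReplace1 pat rep l = (match pvFFind pat l with
      | none => l
      | some j => l.take j ++ rep ++ l.drop (j + pat.length)) := by
  intro l
  induction l with
  | nil =>
      rw [pvReplace1, pvFFind]
      have hp : pat.isPrefixOf ([] : List Char) = false := by
        cases pat with
        | nil => exact absurd rfl hpat
        | cons a b => rfl
      simp [hp]
  | cons c t ih =>
      rw [pvReplace1, pvFFind]
      cases hp : pat.isPrefixOf (c :: t) with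
      | true => simp
      | false =>
          simp only [Bool.false_eq_true, if_false]
          rw [ih]
          cases hf : pvFFind pat t with
          | none => simp [hf]
          | some j =>
              simp only [hf, Option.map_some]
              have h2 : List.drop (j + 1 + pat.length) (c :: t) = List.drop (j + pat.length) t := by
                have h3 : j + 1 + pat.length = (j + pat.length) + 1 := by omega
                rw [h3, List.drop_succ_cons]
              rw [List.take_succ_cons, h2]
              simp

lemma pvSlice_neg_one {α : Type} (xs : List α) : PySem.List.slice xs none (some (-1)) = xs.dropLast := by
  simp only [PySem.List.slice, PySem.List.clampIdx]
  norm_num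
  rcases Nat.eq_zero_or_pos xs.length with h | h
  · simp [List.eq_nil_of_length_eq_zero h]
  · rw [if_neg (by intro hn; simp [hn] at h), List.dropLast_eq_take]
    congr 1
    omega

lemma pvCSlice_neg_one (xs : List Char) : PySem.Chars.slice xs none (some (-1)) = xs.dropLast := by
  rw [PySem.Chars.slice]
  exact pvSlice_neg_one xs

lemma pvGet_zero {α : Type} (xs : List α) : PySem.List.pyGet? xs 0 = xs.head? := by
  simp [PySem.List.pyGet?, PySem.List.pyIdx?]
  cases xs <;> simp

lemma pvGet_neg_one {α : Type} (xs : List α) : PySem.List.pyGet? xs (-1) = xs.getLast? := by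
  rcases List.eq_nil_or_concat xs with h | ⟨ys, a, h⟩ <;> subst h
  · simp [PySem.List.pyGet?, PySem.List.pyIdx?]
  · simp [PySem.List.pyGet?, PySem.List.pyIdx?]

lemma pvSuffix_singleton (w : List Char) (c : Char) : [c] <:+ w ↔ w.getLast? = some c := by
  constructor
  · rintro ⟨t, rfl⟩
    rw [List.getLast?_append]
    rfl
  · intro h
    rcases List.eq_nil_or_concat w with rfl | ⟨ys, a, rfl⟩
    · simp at h
    · rw [List.concat_eq_append, List.getLast?_concat] at h
      obtain rfl : a = c := by simpa using h
      exact ⟨ys, by simp⟩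

lemma pvEndswith_iff (w : List Char) (c : Char) :
    PySem.Chars.endswith w [c] = (w.getLast? == some c) := by
  rw [PySem.Chars.endswith, Bool.eq_iff_iff]
  simp [List.isSuffixOf_iff_suffix, pvSuffix_singleton]

lemma pvStartswith_XMLB (w : List Char) :
    (PySem.Chars.slice w (some 0) (some 4) == ['X', 'M', 'L', 'B']) = PySem.Chars.startswith w ['X', 'M', 'L', 'B'] := by
  have h : PySem.Chars.slice w (some 0) (some 4) = List.take 4 w := by
    rw [PySem.Chars.slice]
    simpa using PySem.List.slice_natCast w 0 4
  rw [h, PySem.Chars.startswith, Bool.eq_iff_iff]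
  constructor
  · intro hb
    simp only [List.isPrefixOf_iff_prefix]
    rw [List.prefix_iff_eq_take]
    have hbe := beq_iff_eq.mp hb
    simp [← hbe]
  · intro hb
    have hpre := List.isPrefixOf_iff_prefix.mp hb
    rw [List.prefix_iff_eq_take] at hpre
    simpa using hpre.symm

lemma pvRstrip_prefix (l : List Char) : PySem.Chars.rstrip l <+: l := by
  rw [PySem.Chars.rstrip]
  have h := List.dropWhile_suffix (l := l.reverse) PySem.Chars.isspace
  have h2 := List.reverse_prefix.mpr h
  rwa [List.reverse_reverse] at h2

lemma pvRstrip_head (c : Char) (X : List Char) (hc : PySem.Chars.isspace c = false) :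
    (PySem.Chars.rstrip (c :: X)).head? = some c := by
  have hne : PySem.Chars.rstrip (c :: X) ≠ [] := by
    rw [Ne, pvRstrip_eq_nil_iff]
    intro hx
    rw [hx c List.mem_cons_self] at hc
    cases hc
  obtain ⟨t, ht⟩ := pvRstrip_prefix (c :: X)
  obtain ⟨d, u, hdu⟩ := List.exists_cons_of_ne_nil hne
  rw [hdu] at ht ⊢
  have hdc : d = c := by
    have := congrArg List.head? ht
    simpa using this
  rw [hdc]
  rfl

-- strip of a quote-headed list keeps the quote in front
lemma pvStrip_head_quote (X : List Char) :
    (PySem.Chars.strip ('"' :: X)).head? = some '"' := by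
  rw [PySem.Chars.strip]
  have h1 : PySem.Chars.lstrip ('"' :: X) = '"' :: X := by
    rw [PySem.Chars.lstrip, List.dropWhile_cons]
    simp [(by decide : PySem.Chars.isspace '"' = false)]
  rw [h1]
  exact pvRstrip_head _ _ (by decide)

lemma pvReplace1_quote (rep t : List Char) :
    pvReplace1 [' ', '=', ' '] rep ('"' :: t) = '"' :: pvReplace1 [' ', '=', ' '] rep t := by
  rw [pvReplace1]
  simp [List.isPrefixOf]

lemma pvLast_append {α : Type} (l m : List α) (d : α) (hm : m.getLast? = some d) :
    (l ++ m).getLast? = some d := by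
  rw [List.getLast?_append, hm]
  rfl

-- well-formedness of a "pad ++ Y"-shaped item
lemma pvOK_of (n : Int) (Y : List Char) (cm cl : Bool) (hY : Y ≠ [])
    (hh : Y.head? ≠ some ',') (hl : Y.getLast? ≠ some ',')
    (hbrace : cm = true → Y.getLast? ≠ some '{') : pvOK (pvSpaces n ++ Y, cm, cl) := by
  refine ⟨by simp [hY], ?_, ?_, ?_⟩
  · rw [List.head?_append]
    cases hk : (pvSpaces n).head? with
    | none => simpa using hh
    | some d =>
        have hd : d = ' ' := by
          rw [pvSpaces] at hk
          cases hnn : n.toNat with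
          | zero => rw [hnn] at hk; cases hk
          | succ m =>
              rw [hnn] at hk
              simp only [List.replicate_succ, List.head?_cons] at hk
              exact (Option.some.inj hk).symm
        simp [hd]
  · rw [List.getLast?_append]
    cases hYl : Y.getLast? with
    | none => exact absurd (List.getLast?_eq_none_iff.mp hYl) hY
    | some d => simpa [hYl] using hl
  · intro hcm
    rw [List.getLast?_append]
    cases hYl : Y.getLast? with
    | none => exact absurd (List.getLast?_eq_none_iff.mp hYl) hY
    | some d => simpa [hYl] using hbrace hcm

-- head of strip(esc(w)[:-1]) is the opening quote (or the string is empty)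
lemma pvStripDropLast_head (flat : List Char) :
    PySem.Chars.strip (('"' :: flat).dropLast) = []
      ∨ (PySem.Chars.strip (('"' :: flat).dropLast)).head? = some '"' := by
  cases flat with
  | nil => left; rfl
  | cons g gs =>
      right
      rw [List.dropLast_cons₂]
      exact pvStrip_head_quote _

-- the replaced-and-possibly-de-semicoloned leaf payload: empty or quote-headed
lemma pvLeaf_head (rep flat : List Char) :
    (if PySem.List.pyGet? (pvReplace1 [' ', '=', ' '] rep ('"' :: flat)) (-1) == some ';'
     then PySem.Chars.strip (PySem.Chars.slice (pvReplace1 [' ', '=', ' '] rep ('"' :: flat)) none (some (-1)))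
     else pvReplace1 [' ', '=', ' '] rep ('"' :: flat)) = []
    ∨ (if PySem.List.pyGet? (pvReplace1 [' ', '=', ' '] rep ('"' :: flat)) (-1) == some ';'
       then PySem.Chars.strip (PySem.Chars.slice (pvReplace1 [' ', '=', ' '] rep ('"' :: flat)) none (some (-1)))
       else pvReplace1 [' ', '=', ' '] rep ('"' :: flat)).head? = some '"' := by
  rw [pvReplace1_quote]
  cases hc : (PySem.List.pyGet? ('"' :: pvReplace1 [' ', '=', ' '] rep flat) (-1) == some ';') with
  | false => right; rw [if_neg (by simp [hc])]; rfl
  | true =>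
      rw [if_pos (by simp [hc]), pvCSlice_neg_one]
      exact pvStripDropLast_head _

lemma pvOK_pair1 : pvOK (['{'], false, false) :=
  ⟨by simp, by simp, by simp, fun hcm => by cases hcm⟩

lemma pvOK_pair2 (X : List Char) :
    pvOK (([' ', ' ', ' ', ' ', '"'] ++ X) ++ ['"', ':', ' ', '{'], false, false) := by
  refine ⟨by simp, by simp, ?_, fun hcm => by cases hcm⟩
  rw [pvLast_append _ _ '{' (by rfl)]
  simp

-- the single step preserves the invariant
lemma pvCore_inv (st : List (List Char) × Int) (tst : List (List Char × Bool × Bool) × Int)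
    (w : List Char) (hw : w ≠ []) (h : pvInv st tst) : pvInv (pvCoreA st w) (pvCoreB tst w) := by
  obtain ⟨h1, h2, h3⟩ := h
  have hOKmem : ∀ (zs : List (List Char × Bool × Bool)), (∀ z ∈ zs, pvOK z) →
      ∀ it ∈ tst.1 ++ zs, pvOK it := by
    intro zs hzs it hit
    rcases List.mem_append.mp hit with hm | hm
    · exact h3 it hm
    · exact hzs it hm
  have hsp4 : pvSpaces 4 = [' ', ' ', ' ', ' '] := rfl
  rw [pvCoreA, pvCoreB, pvStartswith_XMLB, pvGet_neg_one w, ← pvEndswith_iff]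
  by_cases hH : (PySem.Chars.startswith w ['X', 'M', 'L', 'B'] && PySem.Chars.endswith w ['{']) = true
  · -- header line
    rw [if_pos hH, if_pos hH]
    refine ⟨?_, h2, hOKmem _ ?_⟩
    · dsimp only
      rw [show ∀ (z1 z2 : List Char × Bool × Bool), tst.1 ++ [z1, z2] = (tst.1 ++ [z1]) ++ [z2] from fun _ _ => by simp]
      rw [pvRender_append, pvRender_append, ← h1]
      simp [pvLine, hsp4]
    · intro z hz
      rcases List.mem_cons.mp hz with rfl | hz
      · exact pvOK_pair1
      rcases List.mem_cons.mp hz with rfl | hz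
      · exact pvOK_pair2 _
      · cases hz
  · rw [if_neg hH, if_neg hH]
    by_cases hC : (w == ['}']) = true
    · -- closing bracket
      rw [if_pos hC, if_pos hC]
      refine ⟨?_, by dsimp only; omega, hOKmem _ ?_⟩
      · dsimp only
        rw [pvRender_append, h1, pvStripLast_render tst.1 h3]
        congr 2
        rw [pvLine]
        dsimp only
        rw [if_pos (by simp)]
        rw [show st.2 - 4 = 8 + 4 * (tst.2 - 1) from by omega]
        simp
      · intro z hz
        rcases List.mem_cons.mp hz with rfl | hz
        · exact pvOK_of _ ['}'] true true (by simp) (by simp) (by simp) (by simp)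
        · cases hz
    · rw [if_neg hC, if_neg hC]
      by_cases hO : PySem.Chars.endswith w ['{'] = true
      · -- opening bracket
        rw [if_pos hO, if_pos hO]
        rw [pvConvEsc_eq]
        refine ⟨?_, by dsimp only; omega, hOKmem _ ?_⟩
        · dsimp only
          rw [pvRender_append, ← h1]
          congr 2
          rw [pvLine]
          dsimp only
          rw [if_neg (by simp)]
          rw [show st.2 = 8 + 4 * tst.2 from h2]
          simp
        · intro z hz
          rcases List.mem_cons.mp hz with rfl | hz
          · rw [show (pvSpaces (8 + 4 * tst.2) ++ PySem.Chars.strip (PySem.Chars.slice (pvEsc w) none (some (-1)))) ++ ['"', ':', ' ', '{']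
                = pvSpaces (8 + 4 * tst.2) ++ (PySem.Chars.strip (PySem.Chars.slice (pvEsc w) none (some (-1))) ++ ['"', ':', ' ', '{']) from by simp]
            apply pvOK_of
            · simp
            · rw [List.head?_append, pvEsc, pvCSlice_neg_one]
              rcases pvStripDropLast_head (w.flatMap pvEscChar) with he | he
              · rw [he]; simp
              · rw [he]; simp
            · rw [pvLast_append _ _ '{' (by rfl)]
              simp
            · intro hcm; cases hcm
          · cases hz
      · -- leaf line
        rw [if_neg hO, if_neg hO]
        rw [pvConvEsc_eq]
        have hrep : pvReplace1 [' ', '=', ' '] ['"', ':', ' ', '"'] (pvEsc w)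
            = (if PySem.Chars.find (pvEsc w) [' ', '=', ' '] != -1
               then PySem.Chars.slice (pvEsc w) none (some (PySem.Chars.find (pvEsc w) [' ', '=', ' ']))
                    ++ ['"', ':', ' ', '"'] ++ PySem.Chars.slice (pvEsc w) (some (PySem.Chars.find (pvEsc w) [' ', '=', ' '] + 3)) none
               else pvEsc w) := by
          rw [pvReplace1_eq _ _ (by decide), pvFind_eq _ _ (by decide)]
          cases hf : pvFFind [' ', '=', ' '] (pvEsc w) with
          | none => simp
          | some j =>
              dsimp only
              have hj0 : ((j : Int) != -1) = true := by simp
              rw [hj0, if_pos rfl]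
              rw [PySem.Chars.slice, PySem.Chars.slice]
              rw [PySem.List.slice_to (pvEsc w) (b := (j : Int)) (Int.natCast_nonneg j),
                  PySem.List.slice_from (pvEsc w) (a := (j : Int) + 3) (by omega)]
              rw [show ((j : Int)).toNat = j from by omega,
                  show ((j : Int) + 3).toNat = j + 3 from by omega]
              rfl
        refine ⟨?_, h2, hOKmem _ ?_⟩
        · dsimp only
          rw [← hrep, pvEndswith_iff, ← pvGet_neg_one, pvRender_append, ← h1,
              show st.2 = 8 + 4 * tst.2 from h2]
          simp [pvLine]
        · intro z hz
          rw [← hrep, pvEndswith_iff, ← pvGet_neg_one] at hz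
          rcases List.mem_cons.mp hz with rfl | hz
          · rw [show ∀ (wl : List Char), (pvSpaces (8 + 4 * tst.2) ++ wl) ++ ['"']
                = pvSpaces (8 + 4 * tst.2) ++ (wl ++ ['"']) from fun _ => by simp]
            apply pvOK_of
            · simp
            · rw [List.head?_append]
              have hE : pvEsc w = '"' :: w.flatMap pvEscChar := rfl
              rw [hE]
              rcases pvLeaf_head ['"', ':', ' ', '"'] (w.flatMap pvEscChar) with he | he
              · rw [he]; simp
              · rw [he]; simp
            · rw [List.getLast?_concat]
              simp
            · intro hcm
              rw [List.getLast?_concat]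
              simp
          · cases hz

lemma pvFold_inv (ws : List (List Char)) (st : List (List Char) × Int)
    (tst : List (List Char × Bool × Bool) × Int)
    (hws : ∀ w ∈ ws, w ≠ []) (h : pvInv st tst) :
    pvInv (ws.foldl pvCoreA st) (ws.foldl pvCoreB tst) := by
  induction ws generalizing st tst with
  | nil => simpa
  | cons w t ih =>
      exact ih _ _ (fun x hx => hws x (List.mem_cons_of_mem _ hx))
        (pvCore_inv _ _ _ (hws w (List.mem_cons_self)) h)

lemma pvFoldA_eq (lines : List (List Char)) (init : List (List Char) × Int) :
    lines.foldl pvStepA init = ((lines.map PySem.Chars.strip).filter (fun w => !w.isEmpty)).foldl pvCoreA init := by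
  have h1 : lines.foldl pvStepA init
      = lines.foldl (fun st l => if (fun l => !(PySem.Chars.strip l).isEmpty) l then (fun st l => pvCoreA st (PySem.Chars.strip l)) st l else st) init := by
    apply PySem.List.foldl_congr_mem
    intro acc x hx
    rw [pvStepA, pvKeep_iff]
  rw [h1, PySem.List.foldl_if_eq_foldl_filter]
  rw [show ((lines.map PySem.Chars.strip).filter (fun w => !w.isEmpty))
      = (lines.filter (fun l => !(PySem.Chars.strip l).isEmpty)).map PySem.Chars.strip from by
    rw [List.filter_map]
    rfl]
  rw [List.foldl_map]

lemma pvFoldB_eq (lines : List (List Char)) (init : List (List Char × Bool × Bool) × Int) :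
    lines.foldl pvStepB init = ((lines.map PySem.Chars.strip).filter (fun w => !w.isEmpty)).foldl pvCoreB init := by
  have h1 : lines.foldl pvStepB init
      = lines.foldl (fun st l => if (fun l => !(PySem.Chars.strip l).isEmpty) l then (fun st l => pvCoreB st (PySem.Chars.strip l)) st l else st) init := by
    apply PySem.List.foldl_congr_mem
    intro acc x hx
    rw [pvStepB]
    cases he : (PySem.Chars.strip x).isEmpty <;> simp [he]
  rw [h1, PySem.List.foldl_if_eq_foldl_filter]
  rw [show ((lines.map PySem.Chars.strip).filter (fun w => !w.isEmpty))
      = (lines.filter (fun l => !(PySem.Chars.strip l).isEmpty)).map PySem.Chars.strip from by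
    rw [List.filter_map]
    rfl]
  rw [List.foldl_map]

lemma pvRenderZip_eq (items : List (List Char × Bool × Bool)) (h : Bool) :
    pvRenderZip items h = pvRender h items := by
  induction items with
  | nil => rfl
  | cons it t ih =>
      cases t with
      | nil => simp [pvRenderZip, pvRender, pvLine]
      | cons it' rest =>
          rw [pvRenderZip] at ih ⊢
          simp only [List.tail_cons, List.zip_cons_cons, List.map_cons]
          rw [pvRender]
          have hlast : (it :: it' :: rest).getLast? = (it' :: rest).getLast? := by
            simp [List.getLast?_cons_cons]
          rw [hlast]
          simp only [List.cons_append, List.cons.injEq]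
          exact ⟨rfl, by simpa using ih⟩

-- a rendered line equals "{" exactly when the item body is "{" (then it never carries a comma)
lemma pvLine_brace (h : Bool) (it : List Char × Bool × Bool) (hOK : pvOK it) :
    (pvLine h it == ['{']) = (it.1 == ['{']) := by
  obtain ⟨hne, _, _, hcl⟩ := hOK
  rw [pvLine, Bool.eq_iff_iff]
  simp only [beq_iff_eq]
  cases hc : (it.2.1 && !h) with
  | false => simp
  | true =>
      have h21 : it.2.1 = true := (Bool.and_eq_true _ _ |>.mp hc).1
      constructor
      · intro he
        rw [if_pos rfl] at he
        have hlen := congrArg List.length he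
        simp only [List.length_append, List.length_cons, List.length_nil] at hlen
        have h0 : it.1.length = 0 := by omega
        exact absurd (List.eq_nil_of_length_eq_zero h0) hne
      · intro he
        rw [he] at hcl
        exact absurd (hcl h21) (by simp)

lemma pvHeader_iff (items : List (List Char × Bool × Bool)) (hOK : ∀ it ∈ items, pvOK it) :
    (PySem.List.pyGet? (pvRender false items) 0 == some ['{'])
      = (match items.head? with | some it => it.1 == ['{'] | none => false) := by
  rw [pvGet_zero]
  cases items with
  | nil => rfl
  | cons it t =>
      have hOKit := hOK it List.mem_cons_self
      cases t with
      | nil => simp [pvRender, pvLine_brace false it hOKit]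
      | cons it' rest => simp [pvRender, pvLine_brace it'.2.2 it hOKit]

-- ===== VERDICT (by name: the statement is the Claim_ definition above) =====
theorem from_xml_json_spec : Claim_equal_from_xml_json := by
  intro s _hdom _hpre
  show from_xml_json s = from_xml_json_alt s
  rw [from_xml_json, from_xml_json_alt]
  rw [pvFoldA_eq, pvFoldB_eq]
  have hws : ∀ w ∈ ((PySem.Chars.splitOn s.toList ['\n']).map PySem.Chars.strip).filter (fun w => !w.isEmpty), w ≠ [] := by
    intro w hwm
    have := (List.mem_filter.mp hwm).2
    simpa using this
  obtain ⟨h1, h2, h3⟩ := pvFold_inv _ ([], 8) ([], 0) hws ⟨rfl, by norm_num, by simp⟩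
  rw [h1, pvHeader_iff _ h3, pvRenderZip_eq]
  cases hdr : (match (((PySem.Chars.splitOn s.toList ['\n']).map PySem.Chars.strip).filter (fun w => !w.isEmpty)).foldl pvCoreB ([], 0) |>.1.head? with
    | some it => it.1 == ['{'] | none => false) with
  | false => rw [if_neg (by simp [hdr]), if_neg (by simp [hdr])]; simp
  | true =>
      rw [if_pos (by simp [hdr]), if_pos (by simp [hdr])]
      rw [pvStripLast_render _ h3]
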